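-- pv_equiv track=rewrite | github.com/rimgosu/Algorithm | 프로그래머스/1/135808. 과일 장수/과일 장수.py | solution
-- ===== SOURCE A (Python) =====
-- def solution(k, m, score):
--     answer = 0
--     score.sort()
--     temp_stack = []
--
--     while score:
--         temp_stack.append(score.pop())
--
--         if len(temp_stack) == m:
--             while temp_stack:
--                 answer += temp_stack[-1]
--                 temp_stack.pop(0)
--
--     return answer
-- ===== SOURCE B (Python) =====
-- def solution(k, m, score):
--     if m <= 0:
--         return 0
--     s = sorted(score, reverse=True)
--     return m * sum(x for i, x in enumerate(s) if i % m == m - 1)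
-- ===== Notes on version B (the rewrite author's own statement) =====
-- stated objective: faster
-- what changed: Replaces the pop-into-a-stack simulation (with O(m) pop(0) per element) by sorting descending once and summing m times every m-th element via a single enumerate pass.
import Mathlib
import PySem

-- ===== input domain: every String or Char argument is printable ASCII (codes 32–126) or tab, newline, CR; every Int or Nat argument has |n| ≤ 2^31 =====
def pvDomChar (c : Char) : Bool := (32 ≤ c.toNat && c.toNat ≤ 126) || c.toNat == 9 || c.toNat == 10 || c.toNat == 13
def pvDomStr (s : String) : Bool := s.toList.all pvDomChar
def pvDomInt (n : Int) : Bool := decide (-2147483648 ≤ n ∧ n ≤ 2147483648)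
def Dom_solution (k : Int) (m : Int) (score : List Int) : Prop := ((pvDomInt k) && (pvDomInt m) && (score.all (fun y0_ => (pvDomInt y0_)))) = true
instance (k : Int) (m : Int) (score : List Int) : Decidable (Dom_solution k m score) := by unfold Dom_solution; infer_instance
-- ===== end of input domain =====

-- B sorts descending once and sums m * (every m-th element) in one enumerate pass,
-- instead of A's pop-into-a-stack simulation; equivalence is about the RETURN value only
-- (Python A sorts and empties `score` in place, B does not mutate it).

-- ===== PORT A =====
-- inner `while temp_stack:` loop: answer += temp_stack[-1]; temp_stack.pop(0)
def pyInnerA : List Int → Int → Int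
  | [], ans => ans
  | t :: ts, ans => pyInnerA ts (ans + ((PySem.List.pyGet? (t :: ts) (-1)).getD 0))

-- outer `while score:` loop: temp_stack.append(score.pop()); flush when len == m
def pyOuterA (m : Int) (sc ts : List Int) (ans : Int) : Int :=
  match hx : sc.getLast? with
  | none => ans
  | some x =>
    let ts' := ts ++ [x]
    if (ts'.length : Int) = m then pyOuterA m sc.dropLast [] (pyInnerA ts' ans)
    else pyOuterA m sc.dropLast ts' ans
termination_by sc.length
decreasing_by
  all_goals
    { have hne : sc ≠ [] := by
        intro h; rw [h] at hx; simp at hx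
      cases sc with
      | nil => exact absurd rfl hne
      | cons a l => simp [List.length_dropLast] }

def solution (k : Int) (m : Int) (score : List Int) : Int :=
  pyOuterA m (PySem.List.sorted score (fun x => x) false) [] 0

-- ===== PORT B =====
def solution_alt (k : Int) (m : Int) (score : List Int) : Int :=
  if m ≤ 0 then 0
  else
    m * (PySem.List.enumerate (PySem.List.sorted score (fun x => x) true) 0).foldl
          (fun acc p => if PySem.Int.mod p.1 m = m - 1 then acc + p.2 else acc) 0

-- ===== PRECONDITION & SPEC =====
def Spec_solution (k : Int) (m : Int) (score : List Int) (out : Int) : Prop := out = solution_alt k m score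
instance (k : Int) (m : Int) (score : List Int) (out : Int) : Decidable (Spec_solution k m score out) := by unfold Spec_solution; infer_instance

-- ===== CLAIM (what is proved, stated in full; the proofs are below) =====
def Claim_equal_solution : Prop := ∀ (k : Int) (m : Int) (score : List Int), Dom_solution k m score → Spec_solution k m score (solution k m score)

-- ===== LEMMAS AND PROOFS =====

-- proof-only helper: sum of m * (last element of each full m-chunk)
def chunkSum (m : Nat) (l : List Int) : Int :=
  if h : m = 0 ∨ l.length < m then 0
  else (m : Int) * ((l.take m).getLast?.getD 0) + chunkSum m (l.drop m)
termination_by l.length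
decreasing_by
  simp only [List.length_drop]; omega

-- proof-only helper: B's filtered sum written structurally, with running index o
def bsum (m o : Int) (l : List Int) : Int :=
  match l with
  | [] => 0
  | x :: xs => (if PySem.Int.mod o m = m - 1 then x else 0) + bsum m (o + 1) xs

lemma outerA_nil (m : Int) (ts : List Int) (ans : Int) : pyOuterA m [] ts ans = ans := by
  rw [pyOuterA]
  split
  next => rfl
  next x1 h => simp at h

lemma outerA_concat (m : Int) (init : List Int) (x : Int) (ts : List Int) (ans : Int) :
    pyOuterA m (init ++ [x]) ts ans =
      if ((ts ++ [x]).length : Int) = m then pyOuterA m init [] (pyInnerA (ts ++ [x]) ans)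
      else pyOuterA m init (ts ++ [x]) ans := by
  rw [pyOuterA]
  split
  next h => simp at h
  next x1 h =>
    rw [List.getLast?_concat] at h
    obtain rfl : x1 = x := by injection h with h'; exact h'.symm
    simp

lemma innerA_eq : ∀ (ts : List Int) (ans : Int),
    pyInnerA ts ans = ans + (ts.length : Int) * (ts.getLast?.getD 0)
  | [], ans => by simp [pyInnerA]
  | [t], ans => by simp [pyInnerA, PySem.List.pyGet?_neg_one]
  | t :: b :: l, ans => by
    rw [pyInnerA, innerA_eq (b :: l)]
    simp only [PySem.List.pyGet?_neg_one, List.getLast?_cons_cons, List.length_cons]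
    push_cast
    ring

lemma outerA_of_nonpos (m : Int) (hm : m ≤ 0) : ∀ (sc ts : List Int) (ans : Int),
    pyOuterA m sc ts ans = ans := by
  intro sc
  induction sc using List.reverseRecOn with
  | nil => intro ts ans; exact outerA_nil m ts ans
  | append_singleton init x ih =>
    intro ts ans
    rw [outerA_concat]
    have hne : ¬ (((ts ++ [x]).length : Int) = m) := by
      simp only [List.length_append, List.length_cons, List.length_nil]
      push_cast
      omega
    rw [if_neg hne]
    exact ih (ts ++ [x]) ans

lemma chunkSum_small (m : Nat) (l : List Int) (h : l.length < m) : chunkSum m l = 0 := by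
  rw [chunkSum]
  simp [h]

lemma chunkSum_append (m : Nat) (hm : 0 < m) (c r : List Int) (hc : c.length = m) :
    chunkSum m (c ++ r) = (m : Int) * (c.getLast?.getD 0) + chunkSum m r := by
  rw [chunkSum]
  have h1 : ¬ (m = 0 ∨ (c ++ r).length < m) := by
    simp only [List.length_append]
    omega
  rw [dif_neg h1]
  have ht : (c ++ r).take m = c := by
    rw [← hc]; exact List.take_left
  have hd : (c ++ r).drop m = r := by
    rw [← hc]; exact List.drop_left
  rw [ht, hd]

lemma outerA_chunk (m : Nat) (hm : 0 < m) : ∀ (sc ts : List Int) (ans : Int),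
    ts.length < m → pyOuterA (m : Int) sc ts ans = ans + chunkSum m (ts ++ sc.reverse) := by
  intro sc
  induction sc using List.reverseRecOn with
  | nil =>
    intro ts ans h
    rw [outerA_nil, List.reverse_nil, List.append_nil, chunkSum_small m ts h]
    ring
  | append_singleton init x ih =>
    intro ts ans h
    rw [outerA_concat]
    have hrw : ts ++ (init ++ [x]).reverse = (ts ++ [x]) ++ init.reverse := by
      simp
    rw [hrw]
    by_cases hc : (((ts ++ [x]).length : Int) = (m : Int))
    · have hcm : (ts ++ [x]).length = m := by exact_mod_cast hc
      rw [if_pos hc, ih [] (pyInnerA (ts ++ [x]) ans) hm, innerA_eq,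
          chunkSum_append m hm (ts ++ [x]) init.reverse hcm, hcm]
      simp only [List.nil_append]
      ring
    · have hlen : (ts ++ [x]).length < m := by
        have : ¬ ((ts ++ [x]).length = m) := by
          intro hh; exact hc (by exact_mod_cast hh)
        simp only [List.length_append, List.length_cons, List.length_nil] at *
        omega
      rw [if_neg hc, ih (ts ++ [x]) ans hlen]

lemma foldl_eq_bsum (m : Int) : ∀ (l : List Int) (o a : Int),
    (PySem.List.enumerate l o).foldl
        (fun acc p => if PySem.Int.mod p.1 m = m - 1 then acc + p.2 else acc) a
      = a + bsum m o l
  | [], o, a => by simp [PySem.List.enumerate_nil, bsum]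
  | x :: xs, o, a => by
    rw [PySem.List.enumerate_cons]
    simp only [List.foldl_cons]
    rw [foldl_eq_bsum m xs (o + 1), bsum]
    split_ifs <;> ring

lemma mod_small (m o : Int) (hm : 0 < m) (h0 : 0 ≤ o) (h1 : o < m) :
    PySem.Int.mod o m = o := by
  rw [PySem.Int.mod_eq_emod_of_pos hm]
  exact Int.emod_eq_of_lt h0 h1

lemma bsum_small (m : Int) (hm : 0 < m) : ∀ (l : List Int) (o : Int),
    0 ≤ o → o + (l.length : Int) < m → bsum m o l = 0
  | [], o, _, _ => by simp [bsum]
  | x :: xs, o, h0, h1 => by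
    have hlen : o + (xs.length : Int) + 1 < m := by
      simp only [List.length_cons] at h1; push_cast at h1; omega
    rw [bsum, if_neg (by rw [mod_small m o hm h0 (by omega)]; omega),
        bsum_small m hm xs (o + 1) (by omega) (by omega)]
    ring

lemma bsum_shift (m : Int) (hm : 0 < m) : ∀ (l : List Int) (o : Int),
    bsum m (o + m) l = bsum m o l
  | [], o => by simp [bsum]
  | x :: xs, o => by
    have hmod : PySem.Int.mod (o + m) m = PySem.Int.mod o m := by
      rw [PySem.Int.mod_eq_emod_of_pos hm, PySem.Int.mod_eq_emod_of_pos hm]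
      simp [Int.add_emod_right]
    rw [bsum, bsum, hmod]
    have : o + m + 1 = (o + 1) + m := by ring
    rw [this, bsum_shift m hm xs (o + 1)]

lemma bsum_append (m : Int) : ∀ (a b : List Int) (o : Int),
    bsum m o (a ++ b) = bsum m o a + bsum m (o + (a.length : Int)) b
  | [], b, o => by simp [bsum]
  | x :: xs, b, o => by
    simp only [List.cons_append, bsum, List.length_cons]
    rw [bsum_append m xs b (o + 1)]
    push_cast
    ring_nf

lemma bsum_last (m : Int) (hm : 0 < m) : ∀ (c : List Int) (o : Int),
    0 ≤ o → o + (c.length : Int) = m → c ≠ [] → bsum m o c = c.getLast?.getD 0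
  | [], _, _, _, hne => absurd rfl hne
  | [x], o, h0, h1, _ => by
    have ho : o = m - 1 := by simp at h1; omega
    rw [bsum, if_pos (by rw [ho, mod_small m (m-1) hm (by omega) (by omega)]), bsum]
    simp
  | x :: b :: l, o, h0, h1, _ => by
    have hlen : (o + 1) + ((b :: l).length : Int) = m := by
      simp only [List.length_cons] at h1 ⊢; push_cast at h1; omega
    have holt : o < m - 1 := by
      simp only [List.length_cons] at h1; push_cast at h1; omega
    rw [bsum, if_neg (by rw [mod_small m o hm h0 (by omega)]; omega),
        bsum_last m hm (b :: l) (o + 1) (by omega) hlen (by simp),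
        List.getLast?_cons_cons]
    ring

lemma chunk_eq_bsum (m : Nat) (hm : 0 < m) : ∀ (n : Nat) (l : List Int), l.length ≤ n →
    chunkSum m l = (m : Int) * bsum (m : Int) 0 l := by
  intro n
  induction n with
  | zero =>
    intro l hl
    have : l = [] := List.length_eq_zero_iff.mp (by omega)
    subst this
    rw [chunkSum_small m [] hm]
    simp [bsum]
  | succ n ih =>
    intro l hl
    by_cases hsm : l.length < m
    · rw [chunkSum_small m l hsm,
          bsum_small (m : Int) (by exact_mod_cast hm) l 0 le_rfl (by push_cast; omega)]
      ring
    · have hml : m ≤ l.length := by omega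
      have hsplit : l = l.take m ++ l.drop m := (List.take_append_drop m l).symm
      have htl : (l.take m).length = m := by
        rw [List.length_take]; omega
      have hdl : (l.drop m).length ≤ n := by
        rw [List.length_drop]; omega
      calc chunkSum m l = chunkSum m (l.take m ++ l.drop m) := by rw [← hsplit]
        _ = (m : Int) * ((l.take m).getLast?.getD 0) + chunkSum m (l.drop m) :=
            chunkSum_append m hm _ _ htl
        _ = (m : Int) * ((l.take m).getLast?.getD 0) + (m : Int) * bsum (m : Int) 0 (l.drop m) := by
            rw [ih (l.drop m) hdl]
        _ = (m : Int) * bsum (m : Int) 0 l := by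
            have hmpos : (0 : Int) < (m : Int) := by exact_mod_cast hm
            have hbl : bsum (m : Int) 0 (l.take m) = (l.take m).getLast?.getD 0 :=
              bsum_last (m : Int) hmpos (l.take m) 0 le_rfl (by rw [htl]; push_cast; ring)
                (by intro hh; rw [hh] at htl; simp at htl; omega)
            conv_rhs => rw [hsplit]
            rw [bsum_append, hbl, htl, bsum_shift (m : Int) hmpos _ 0]
            ring

lemma rev_sorted_eq (xs : List Int) :
    (PySem.List.sorted xs (fun x => x) false).reverse = PySem.List.sorted xs (fun x => x) true := by
  have h1 : ((PySem.List.sorted xs (fun x => x) true).reverse).Pairwise (· ≤ ·) := by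
    rw [List.pairwise_reverse]
    exact PySem.List.sorted_pairwise_rev xs (fun x => x)
  have h2 : (PySem.List.sorted xs (fun x => x) false).Pairwise (· ≤ ·) :=
    PySem.List.sorted_pairwise xs (fun x => x)
  have hp : (PySem.List.sorted xs (fun x => x) true).reverse.Perm
      (PySem.List.sorted xs (fun x => x) false) :=
    (List.reverse_perm _).trans ((PySem.List.sorted_perm xs (fun x => x) true).trans
      (PySem.List.sorted_perm xs (fun x => x) false).symm)
  have heq := List.eq_of_perm_of_sorted (fun a b _ _ hab hba => le_antisymm hab hba) h1 h2 hp
  rw [← heq, List.reverse_reverse]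

-- ===== VERDICT (by name: the statement is the Claim_ definition above) =====
theorem solution_spec : Claim_equal_solution := by
  intro k m score _
  unfold Spec_solution solution solution_alt
  by_cases hm : m ≤ 0
  · rw [if_pos hm]
    exact outerA_of_nonpos m hm _ [] 0
  · rw [if_neg hm]
    obtain ⟨n, rfl⟩ : ∃ n : Nat, m = (n : Int) :=
      ⟨m.toNat, (Int.toNat_of_nonneg (by omega)).symm⟩
    have hn : 0 < n := by omega
    rw [foldl_eq_bsum (n : Int) _ 0 0,
        outerA_chunk n hn _ [] 0 (by simpa using hn)]
    simp only [List.nil_append]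
    rw [rev_sorted_eq, chunk_eq_bsum n hn _ _ le_rfl]
    ring
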